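-- pv_equiv track=rewrite | github.com/pedrohtg/sos-challenge-2024 | Obstacle_Sequence_Challenge/datasets/wuppertal_obstacle_sequences.py | convert_target
-- ===== SOURCE A (Python) =====
-- def convert_target(target_list, targets_basenames):
--     target = []
--     j = 0
--     for i in range(len(targets_basenames)):
--         if targets_basenames[i]:
--             target.append(target_list[j])
--             j += 1
--         else:
--             target.append(None)
--     return target
-- ===== SOURCE B (Python) =====
-- def convert_target(target_list, targets_basenames):
--     # Back-to-front: copy the needed prefix, then walk the mask reversed,
--     # popping values off the end of the copy; reverse the built list at the end.
--     vals = target_list[:sum(targets_basenames)]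
--     out = []
--     for m in reversed(targets_basenames):
--         out.append(vals.pop() if m else None)
--     out.reverse()
--     return out
-- ===== Notes on version B (the rewrite author's own statement) =====
-- stated objective: alternative
-- what changed: B builds the result back-to-front: it copies the needed prefix of target_list, walks the mask in reverse popping values off the end of that copy, and reverses the accumulated list at the end, instead of A's forward append loop with a hand-advanced counter j.
import Mathlib
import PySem

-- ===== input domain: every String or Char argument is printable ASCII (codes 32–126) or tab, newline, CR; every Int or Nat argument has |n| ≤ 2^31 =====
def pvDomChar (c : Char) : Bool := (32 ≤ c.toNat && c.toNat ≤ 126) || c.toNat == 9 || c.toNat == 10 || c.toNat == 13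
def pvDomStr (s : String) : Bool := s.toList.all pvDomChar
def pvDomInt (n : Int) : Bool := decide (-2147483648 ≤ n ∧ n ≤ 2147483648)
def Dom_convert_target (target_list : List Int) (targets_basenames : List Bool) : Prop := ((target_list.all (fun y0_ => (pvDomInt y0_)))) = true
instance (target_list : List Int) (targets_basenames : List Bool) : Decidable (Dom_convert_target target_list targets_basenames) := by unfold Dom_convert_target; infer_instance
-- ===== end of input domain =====

-- B builds the result back-to-front: it copies the needed prefix of target_list, walks the
-- mask reversed popping values off the end of the copy, and reverses at the end (objective: alternative).

-- ===== PORT A =====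
-- A: single forward pass over the mask, appending target_list[j] (counter j) or None.
-- target_list[j] is ported as pyGet?; its 'none' marks the IndexError Python raises there
-- (exactly the inputs Pre_convert_target excludes).
def convert_target (target_list : List Int) (targets_basenames : List Bool) : List (Option Int) :=
  (targets_basenames.foldl
    (fun (st : List (Option Int) × Nat) b =>
      if b then (st.1 ++ [PySem.List.pyGet? target_list (st.2 : Int)], st.2 + 1)
      else (st.1 ++ [none], st.2))
    ([], 0)).1

-- ===== PORT B =====
-- B: vals = target_list[:sum(tb)]; for m in reversed(tb): out.append(vals.pop() if m else None);
--    out.reverse(). vals.pop() on an empty list is Python's IndexError (outside Pre_);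
--    the port's pop? returns none there and this totalization appends none.
def bStep (st : List Int × List (Option Int)) (m : Bool) : List Int × List (Option Int) :=
  if m then
    match PySem.List.pop? st.1 (-1) with
    | some (v, rest) => (rest, st.2 ++ [some v])
    | none => (st.1, st.2 ++ [none])
  else (st.1, st.2 ++ [none])

def convert_target_alt (target_list : List Int) (targets_basenames : List Bool) : List (Option Int) :=
  let k := targets_basenames.foldl (fun (a : Int) b => a + (if b then 1 else 0)) 0
  let vals := PySem.List.slice target_list none (some k)
  ((targets_basenames.reverse.foldl bStep (vals, [])).2).reverse

-- ===== PRECONDITION & SPEC =====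
-- Pre_ excludes exactly the inputs where Python A raises IndexError (more truthy mask
-- entries than values in target_list); B raises IndexError there too (pop from empty list).
def Pre_convert_target (target_list : List Int) (targets_basenames : List Bool) : Prop :=
  targets_basenames.count true ≤ target_list.length
instance (target_list : List Int) (targets_basenames : List Bool) : Decidable (Pre_convert_target target_list targets_basenames) := by unfold Pre_convert_target; infer_instance
def pvWitness_convert_target : List Int × List Bool := ([3, 7], [true, false, true])

def Spec_convert_target (target_list : List Int) (targets_basenames : List Bool) (out : List (Option Int)) : Prop := out = convert_target_alt target_list targets_basenames
instance (target_list : List Int) (targets_basenames : List Bool) (out : List (Option Int)) : Decidable (Spec_convert_target target_list targets_basenames out) := by unfold Spec_convert_target; infer_instance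

-- ===== CLAIM =====
def Claim_equal_convert_target : Prop := ∀ (target_list : List Int) (targets_basenames : List Bool), Dom_convert_target target_list targets_basenames → Pre_convert_target target_list targets_basenames → Spec_convert_target target_list targets_basenames (convert_target target_list targets_basenames)

-- ===== LEMMAS AND PROOFS =====

/-- Forward interleaving of the mask with values consumed from the front of `vs`. -/
def interleave : List Int → List Bool → List (Option Int)
  | _, [] => []
  | vs, b :: r => if b then vs.head? :: interleave (vs.drop 1) r else none :: interleave vs r

/-- Recursive characterisation of A's fold. -/
def interleaveSpec (tl : List Int) (j : Nat) : List Bool → List (Option Int)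
  | [] => []
  | b :: r =>
    if b then PySem.List.pyGet? tl (j : Int) :: interleaveSpec tl (j + 1) r
    else none :: interleaveSpec tl j r

theorem foldA_eq (tl : List Int) (tb : List Bool) :
    ∀ (acc : List (Option Int)) (j : Nat),
      (tb.foldl
        (fun (st : List (Option Int) × Nat) b =>
          if b then (st.1 ++ [PySem.List.pyGet? tl (st.2 : Int)], st.2 + 1)
          else (st.1 ++ [none], st.2))
        (acc, j)).1 = acc ++ interleaveSpec tl j tb := by
  induction tb with
  | nil => intro acc j; simp [interleaveSpec]
  | cons b r ih =>
    intro acc j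
    cases b with
    | false =>
      rw [List.foldl_cons]
      have h := ih (acc ++ [(none : Option Int)]) j
      simpa [interleaveSpec] using h
    | true =>
      rw [List.foldl_cons]
      have h := ih (acc ++ [PySem.List.pyGet? tl (j : Int)]) (j + 1)
      simpa [interleaveSpec] using h

theorem interleaveSpec_eq_interleave (tl : List Int) :
    ∀ (tb : List Bool) (j : Nat), j + tb.count true ≤ tl.length →
      interleaveSpec tl j tb = interleave (tl.drop j) tb := by
  intro tb
  induction tb with
  | nil => intro j _; simp [interleaveSpec, interleave]
  | cons b r ih =>
    intro j h
    cases b with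
    | false =>
      have hr : j + r.count true ≤ tl.length := by simpa using h
      simp [interleaveSpec, interleave, ih j hr]
    | true =>
      have hj : j < tl.length := by simp [List.count_cons] at h; omega
      have hr : (j + 1) + r.count true ≤ tl.length := by simp [List.count_cons] at h; omega
      show PySem.List.pyGet? tl (j : Int) :: interleaveSpec tl (j + 1) r
          = (tl.drop j).head? :: interleave ((tl.drop j).drop 1) r
      rw [PySem.List.pyGet?_natCast, ih (j + 1) hr, List.head?_drop, List.drop_drop,
        List.getElem?_eq_getElem hj]

/-- The Int-valued sum of the mask is its `true` count. -/
theorem sum_mask_eq_count (tb : List Bool) :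
    ∀ (a : Int), tb.foldl (fun (a : Int) b => a + (if b then 1 else 0)) a
      = a + (tb.count true : Int) := by
  induction tb with
  | nil => intro a; simp
  | cons b r ih =>
    intro a
    rw [List.foldl_cons, ih]
    cases b <;> simp [List.count_cons] <;> push_cast <;> ring

/-- B's reversed fold: pops consume the tail of `vals`, the accumulator collects the
    reversed interleaving of the consumed suffix. -/
theorem foldB_eq (tb : List Bool) :
    ∀ (vals : List Int) (acc : List (Option Int)), tb.count true ≤ vals.length →
      tb.reverse.foldl bStep (vals, acc)
        = (vals.take (vals.length - tb.count true),
           acc ++ (interleave (vals.drop (vals.length - tb.count true)) tb).reverse) := by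
  induction tb with
  | nil => intro vals acc _; simp [interleave]
  | cons b r ih =>
    intro vals acc h
    have hr : r.count true ≤ vals.length := by
      simp [List.count_cons] at h; omega
    rw [List.reverse_cons, List.foldl_append, ih vals acc hr, List.foldl_cons, List.foldl_nil]
    cases b with
    | false =>
      have hcount : (false :: r).count true = r.count true := by simp
      rw [hcount]
      simp [bStep, interleave]
    | true =>
      have hc : r.count true + 1 ≤ vals.length := by simp [List.count_cons] at h; omega
      have hlt : vals.length - (r.count true + 1) < vals.length := by omega
      have hts : vals.take (vals.length - r.count true)
          = vals.take (vals.length - (r.count true + 1))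
            ++ [vals[vals.length - (r.count true + 1)]] := by
        have he : vals.length - r.count true = (vals.length - (r.count true + 1)) + 1 := by omega
        rw [he, List.take_add_one, List.getElem?_eq_getElem hlt]
        rfl
      have hpop : PySem.List.pop? (vals.take (vals.length - r.count true)) (-1)
          = some (vals[vals.length - (r.count true + 1)],
                  vals.take (vals.length - (r.count true + 1))) := by
        rw [hts, PySem.List.pop?_last]
      have hcount : (true :: r).count true = r.count true + 1 := by simp
      rw [hcount]
      have hb : bStep (vals.take (vals.length - r.count true),
            acc ++ (interleave (vals.drop (vals.length - r.count true)) r).reverse) true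
          = (vals.take (vals.length - (r.count true + 1)),
             (acc ++ (interleave (vals.drop (vals.length - r.count true)) r).reverse)
               ++ [some vals[vals.length - (r.count true + 1)]]) := by
        simp [bStep, hpop]
      rw [hb]
      have hinter : interleave (vals.drop (vals.length - (r.count true + 1))) (true :: r)
          = some vals[vals.length - (r.count true + 1)]
              :: interleave (vals.drop (vals.length - r.count true)) r := by
        show (vals.drop (vals.length - (r.count true + 1))).head?
            :: interleave ((vals.drop (vals.length - (r.count true + 1))).drop 1) r = _
        rw [List.head?_drop, List.drop_drop, List.getElem?_eq_getElem hlt]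
        have h2 : vals.length - (r.count true + 1) + 1 = vals.length - r.count true := by omega
        rw [h2]
      rw [hinter, List.reverse_cons, List.append_assoc]

/-- `interleave` only reads the first `count true` values. -/
theorem interleave_take (tb : List Bool) :
    ∀ (vs : List Int), interleave (vs.take (tb.count true)) tb = interleave vs tb := by
  induction tb with
  | nil => intro vs; simp [interleave]
  | cons b r ih =>
    intro vs
    cases b with
    | false =>
      simp only [interleave, if_neg Bool.false_ne_true]
      rw [show (false :: r).count true = r.count true by simp [List.count_cons], ih vs]
    | true =>
      simp only [interleave, if_true]
      rw [show (true :: r).count true = r.count true + 1 by simp [List.count_cons]]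
      cases vs with
      | nil => simp [ih]
      | cons v vs' =>
        simp only [List.take_succ_cons, List.head?_cons, List.drop_one, List.tail_cons]
        rw [ih vs']

-- ===== VERDICT =====
theorem convert_target_spec : Claim_equal_convert_target := by
  intro tl tb _ hpre
  unfold Pre_convert_target at hpre
  unfold Spec_convert_target convert_target convert_target_alt
  have hA := foldA_eq tl tb [] 0
  simp only [List.nil_append] at hA
  rw [hA]
  have hk : tb.foldl (fun (a : Int) b => a + (if b then 1 else 0)) 0 = (tb.count true : Int) := by
    simpa using sum_mask_eq_count tb 0
  simp only [hk]
  rw [PySem.List.slice_to tl (by positivity), Int.toNat_natCast]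
  have hlenv : (tl.take (tb.count true)).length = tb.count true := by
    simp [Nat.min_eq_left hpre]
  have hB := foldB_eq tb (tl.take (tb.count true)) [] (by rw [hlenv])
  rw [hlenv] at hB
  simp only [Nat.sub_self, List.take_zero, List.drop_zero, List.nil_append] at hB
  rw [hB]
  simp only [List.reverse_reverse]
  rw [interleave_take tb tl]
  have hsi := interleaveSpec_eq_interleave tl tb 0 (by omega)
  rw [List.drop_zero] at hsi
  exact hsi
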